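-- pv_equiv track=rewrite | github.com/JohnnyKaz/Advent-of-Code | 2015/05/day05.py | isNiceStringPt1
-- ===== SOURCE A (Python) =====
-- def isNiceStringPt1(str):
--     vowels = "aeiou"
--     bannedPairs = {'a':'b', 'c':'d', 'p':'q', 'x':'y'}
--     vowelCount = 1 if str[0] in vowels else 0
--     hasConsecutiveLetter = False
--
--     prev = str[0]
--     for curr in str[1:]:
--         if prev in bannedPairs.keys() and curr == bannedPairs[prev]:
--             return False
--         if curr in vowels:
--             vowelCount += 1
--         if prev == curr:
--             hasConsecutiveLetter = True
--         prev = curr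
--     return vowelCount >= 3 and hasConsecutiveLetter
-- ===== SOURCE B (Python) =====
-- def isNiceStringPt1(str):
--     pairs = list(zip(str, str[1:]))
--     if any(a + b in ("ab", "cd", "pq", "xy") for a, b in pairs):
--         return False
--     vowels = sum(c in "aeiou" for c in str)
--     return vowels >= 3 and any(a == b for a, b in pairs)
-- ===== Notes on version B (the rewrite author's own statement) =====
-- stated objective: idiomatic
-- what changed: Replaced the single fused loop with accumulators and an early return by three independent declarative passes: a zip of adjacent pairs checked against the banned pairs, a sum counting vowels, and an any() looking for a doubled letter.
import Mathlib
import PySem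

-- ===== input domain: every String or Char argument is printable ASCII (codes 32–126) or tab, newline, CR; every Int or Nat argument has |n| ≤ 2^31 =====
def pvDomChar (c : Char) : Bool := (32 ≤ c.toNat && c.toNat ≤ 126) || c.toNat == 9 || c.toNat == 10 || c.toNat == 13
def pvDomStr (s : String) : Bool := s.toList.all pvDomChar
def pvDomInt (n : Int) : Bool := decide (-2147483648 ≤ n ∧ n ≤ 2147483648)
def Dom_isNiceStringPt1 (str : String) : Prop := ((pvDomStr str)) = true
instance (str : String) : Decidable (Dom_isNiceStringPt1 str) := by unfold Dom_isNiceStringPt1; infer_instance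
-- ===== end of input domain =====

-- B replaces A's fused early-return loop (prev/vowelCount/hasConsecutiveLetter accumulators) by three independent passes over the string: one zip scan for a banned adjacent pair, one count of vowels, one scan for a doubled letter. Idiomatic decomposition, same cost. On "" A raises IndexError (excluded by Pre_); B returns False there.


-- ===== PORT A =====
-- bannedPairs = {'a':'b', 'c':'d', 'p':'q', 'x':'y'}
def pvBannedPairs : PySem.Dict Char Char := PySem.Dict.ofList [('a','b'), ('c','d'), ('p','q'), ('x','y')]

-- the for-loop over str[1:], carrying prev, vowelCount, hasConsecutiveLetter
def pvLoopA : Char → List Char → Int → Bool → Bool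
  | _, [], vowelCount, hasConsecutiveLetter => decide (vowelCount ≥ 3) && hasConsecutiveLetter
  | prev, curr :: rest, vowelCount, hasConsecutiveLetter =>
    -- 'prev in bannedPairs.keys() and curr == bannedPairs[prev]' (the lookup only happens when the key is present)
    if pvBannedPairs.contains prev && (curr == (pvBannedPairs.get? prev).getD curr && (pvBannedPairs.get? prev).isSome) then
      false
    else
      pvLoopA curr rest
        (if curr ∈ ['a','e','i','o','u'] then vowelCount + 1 else vowelCount)
        (if prev == curr then true else hasConsecutiveLetter)

def isNiceStringPt1 (str : String) : Bool :=
  match str.toList with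
  | [] => false   -- str[0] raises IndexError in Python here; excluded by Pre_
  | c :: rest => pvLoopA c rest (if c ∈ ['a','e','i','o','u'] then 1 else 0) false

-- ===== PORT B =====
-- pairs = list(zip(str, str[1:]))
def pvPairsB (s : List Char) : List (Char × Char) := s.zip s.tail

def isNiceStringPt1_alt (str : String) : Bool :=
  let s := str.toList
  let pairs := pvPairsB s
  -- any(a + b in ("ab", "cd", "pq", "xy") for a, b in pairs)
  if pairs.any (fun p => [p.1, p.2] ∈ [['a','b'], ['c','d'], ['p','q'], ['x','y']]) then
    false
  else
    -- sum(c in "aeiou" for c in str) >= 3 and any(a == b for a, b in pairs)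
    decide (((s.countP (fun c => c ∈ ['a','e','i','o','u']) : Int)) ≥ 3)
      && pairs.any (fun p => p.1 == p.2)

-- ===== PRECONDITION & SPEC =====
-- A reads str[0] before its loop, so it raises IndexError on the empty string; Pre_ excludes exactly that input.
def Pre_isNiceStringPt1 (str : String) : Prop := str ≠ ""
instance (str : String) : Decidable (Pre_isNiceStringPt1 str) := by unfold Pre_isNiceStringPt1; infer_instance
def pvWitness_isNiceStringPt1 : String := "aabcde"

def Spec_isNiceStringPt1 (str : String) (out : Bool) : Prop := out = isNiceStringPt1_alt str
instance (str : String) (out : Bool) : Decidable (Spec_isNiceStringPt1 str out) := by unfold Spec_isNiceStringPt1; infer_instance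

-- ===== CLAIM (what is proved, stated in full; the proofs are below) =====
def Claim_equal_isNiceStringPt1 : Prop := ∀ (str : String), Dom_isNiceStringPt1 str → Pre_isNiceStringPt1 str → Spec_isNiceStringPt1 str (isNiceStringPt1 str)

-- ===== LEMMAS AND PROOFS =====
lemma banned_point (a b : Char) :
    (pvBannedPairs.contains a && (b == (pvBannedPairs.get? a).getD b && (pvBannedPairs.get? a).isSome))
      = decide ([a, b] ∈ [['a','b'], ['c','d'], ['p','q'], ['x','y']]) := by
  have h : pvBannedPairs = PySem.Dict.mk [('a','b'), ('c','d'), ('p','q'), ('x','y')] := by decide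
  rw [h]
  by_cases ha : a = 'a'
  · subst ha; simp [PySem.Dict.contains, PySem.Dict.get?, List.find?]; rw [Bool.eq_iff_iff]; simp
  by_cases hc : a = 'c'
  · subst hc; simp [PySem.Dict.contains, PySem.Dict.get?, List.find?]; rw [Bool.eq_iff_iff]; simp
  by_cases hp : a = 'p'
  · subst hp; simp [PySem.Dict.contains, PySem.Dict.get?, List.find?]; rw [Bool.eq_iff_iff]; simp
  by_cases hx : a = 'x'
  · subst hx; simp [PySem.Dict.contains, PySem.Dict.get?, List.find?]; rw [Bool.eq_iff_iff]; simp
  · simp [PySem.Dict.contains, PySem.Dict.get?, List.find?,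
      Ne.symm ha, Ne.symm hc, Ne.symm hp, Ne.symm hx, ha, hc, hp, hx]

lemma loopA_eq (rest : List Char) : ∀ (prev : Char) (vc : Int) (hc : Bool),
    pvLoopA prev rest vc hc
      = if ((prev :: rest).zip rest).any
            (fun p => [p.1, p.2] ∈ [['a','b'], ['c','d'], ['p','q'], ['x','y']]) then
          false
        else
          decide (vc + (rest.countP (fun c => c ∈ ['a','e','i','o','u']) : Int) ≥ 3)
            && (hc || ((prev :: rest).zip rest).any (fun p => p.1 == p.2)) := by
  induction rest with
  | nil => intro prev vc hc; simp [pvLoopA]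
  | cons curr rest ih =>
    intro prev vc hc
    rw [pvLoopA, banned_point prev curr, ih]
    by_cases hban : [prev, curr] ∈ [['a','b'], ['c','d'], ['p','q'], ['x','y']]
    · simp only [List.zip_cons_cons, List.any_cons, decide_eq_true hban, Bool.true_or, if_true]
    · have hb' : decide ([prev, curr] ∈ [['a','b'], ['c','d'], ['p','q'], ['x','y']]) = false :=
        decide_eq_false hban
      simp only [List.zip_cons_cons, List.any_cons, hb', Bool.false_or, Bool.false_eq_true,
        if_false]
      by_cases htail : (((curr :: rest).zip rest).any
          (fun p => decide ([p.1, p.2] ∈ [['a','b'], ['c','d'], ['p','q'], ['x','y']]))) = true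
      · rw [if_pos htail, if_pos htail]
      · rw [if_neg htail, if_neg htail]
        have hcnt : (if curr ∈ ['a','e','i','o','u'] then vc + 1 else vc)
            + ((rest.countP (fun c => c ∈ ['a','e','i','o','u'])) : Int)
            = vc + (((curr :: rest).countP (fun c => c ∈ ['a','e','i','o','u'])) : Int) := by
          rw [List.countP_cons]
          by_cases hv : curr ∈ ['a','e','i','o','u'] <;> simp [hv] <;> push_cast <;> omega
        rw [hcnt]
        congr 1
        by_cases heq : prev = curr
        · simp [heq]
        · simp [beq_eq_false_iff_ne.mpr heq]

lemma main_list (c : Char) (rest : List Char) :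
    pvLoopA c rest (if c ∈ ['a','e','i','o','u'] then 1 else 0) false
      = if (pvPairsB (c :: rest)).any
            (fun p => [p.1, p.2] ∈ [['a','b'], ['c','d'], ['p','q'], ['x','y']]) then
          false
        else
          decide ((((c :: rest).countP (fun x => x ∈ ['a','e','i','o','u'])) : Int) ≥ 3)
            && (pvPairsB (c :: rest)).any (fun p => p.1 == p.2) := by
  rw [loopA_eq]
  simp only [pvPairsB, List.tail_cons]
  have hcnt : (if c ∈ ['a','e','i','o','u'] then (1:Int) else 0)
      + ((rest.countP (fun x => x ∈ ['a','e','i','o','u'])) : Int)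
      = (((c :: rest).countP (fun x => x ∈ ['a','e','i','o','u'])) : Int) := by
    rw [List.countP_cons]
    by_cases hv : c ∈ ['a','e','i','o','u'] <;> simp [hv] <;> push_cast <;> omega
  rw [hcnt]
  simp


-- ===== VERDICT (by name: the statement is the Claim_ definition above) =====
theorem isNiceStringPt1_spec : Claim_equal_isNiceStringPt1 := by
  intro str _ hpre
  unfold Spec_isNiceStringPt1
  cases hsl : str.toList with
  | nil => simp at hsl; exact absurd hsl hpre
  | cons c rest =>
    simp only [isNiceStringPt1, isNiceStringPt1_alt, hsl]
    exact main_list c rest
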